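-- pv_equiv track=rewrite | github.com/viscontie/Data-backed-Website | team-project-d-main/ProductionCode/birth_control.py | count_birth_control_access_answers
-- ===== SOURCE A (Python) =====
-- def count_birth_control_access_answers(access_answers):
--     """
--     Counts the amount of each possible response to the access question in the dataset
--     regarding concerns about future access to birth control for the appropriate list
--     of users based on inputted demographic. Then, compiles a dictionary of each possible
--     response and the amount of times that response was chosen.
--         Parameters:
--             access_answers = the list of answers to the question about birth control access concerns
--             from the people in the specified demographic.
--     Returns the dictionary totaled_answers which includes the amount of each possible response
--     for the question of birth control access concerns.
--     """
--     veryConcerned=0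
--     somewhatConcerned=0
--     notVeryConcerned=0
--     notAtAllConcerned=0
--     notApplicable=0
--     dontKnow=0
--     refused=0
--
--     totaled_answers={}
--     for item in access_answers:
--         if item == ('Very concerned',):
--             veryConcerned=veryConcerned+1
--         elif item== ('Not applicable/don\'t believe in birth control',):
--             notApplicable= notApplicable+1
--         elif item == ('Somewhat concerned',):
--             somewhatConcerned= somewhatConcerned+1
--         elif item == ('Not very concerned',):
--             notVeryConcerned=notVeryConcerned+1
--         elif item== ('Not at all concerned',):
--             notAtAllConcerned=notAtAllConcerned+1
--         elif item == ('Don\'t know',):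
--             dontKnow=dontKnow+1
--         else:
--             refused=refused+1
--     totaled_answers["Very concerned"]=veryConcerned
--     totaled_answers["Not applicable/don't believe in birth control"]=notApplicable
--     totaled_answers["Somewhat concerned"]=somewhatConcerned
--     totaled_answers["Not very concerned"]=notVeryConcerned
--     totaled_answers["Not at all concerned"]=notAtAllConcerned
--     totaled_answers["Don't know"]=dontKnow
--     totaled_answers["Refused"]=refused
--     return totaled_answers
-- ===== SOURCE B (Python) =====
-- def count_birth_control_access_answers(access_answers):
--     labels = ["Very concerned", "Not applicable/don't believe in birth control",
--               "Somewhat concerned", "Not very concerned", "Not at all concerned",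
--               "Don't know"]
--     totaled_answers = {lab: access_answers.count((lab,)) for lab in labels}
--     totaled_answers["Refused"] = len(access_answers) - sum(totaled_answers.values())
--     return totaled_answers
-- ===== Notes on version B (the rewrite author's own statement) =====
-- stated objective: simpler
-- what changed: Replaced the 7-way if/elif chain over seven mutable counters by a dict comprehension counting each known answer with list.count, with 'Refused' derived as total length minus the sum of the six named counts instead of an else branch.
import Mathlib
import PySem

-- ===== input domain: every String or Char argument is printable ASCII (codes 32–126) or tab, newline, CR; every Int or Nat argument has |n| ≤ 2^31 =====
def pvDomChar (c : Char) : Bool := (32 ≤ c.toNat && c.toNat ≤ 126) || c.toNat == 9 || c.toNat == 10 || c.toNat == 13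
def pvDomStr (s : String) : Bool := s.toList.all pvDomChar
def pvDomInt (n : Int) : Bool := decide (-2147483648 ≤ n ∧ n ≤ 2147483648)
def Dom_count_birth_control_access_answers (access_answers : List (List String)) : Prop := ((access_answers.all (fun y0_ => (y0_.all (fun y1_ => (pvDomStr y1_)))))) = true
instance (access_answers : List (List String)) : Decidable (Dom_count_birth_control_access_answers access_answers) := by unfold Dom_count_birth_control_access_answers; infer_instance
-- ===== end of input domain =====

-- B counts each known answer with list.count and derives 'Refused' as length minus the sum of the
-- six named counts, replacing A's 7-way if/elif chain over seven mutable counters (objective: simpler).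


-- ===== PORT A =====
-- the loop body: the if/elif chain over the seven counters (each row is the 1-tuple ('…',) = ["…"])
def stepA (st : Int × Int × Int × Int × Int × Int × Int) (item : List String) :
    Int × Int × Int × Int × Int × Int × Int :=
  let (vc, na, sc, nvc, naac, dk, rf) := st
  if item = ["Very concerned"] then (vc + 1, na, sc, nvc, naac, dk, rf)
  else if item = ["Not applicable/don't believe in birth control"] then (vc, na + 1, sc, nvc, naac, dk, rf)
  else if item = ["Somewhat concerned"] then (vc, na, sc + 1, nvc, naac, dk, rf)
  else if item = ["Not very concerned"] then (vc, na, sc, nvc + 1, naac, dk, rf)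
  else if item = ["Not at all concerned"] then (vc, na, sc, nvc, naac + 1, dk, rf)
  else if item = ["Don't know"] then (vc, na, sc, nvc, naac, dk + 1, rf)
  else (vc, na, sc, nvc, naac, dk, rf + 1)

def count_birth_control_access_answers (access_answers : List (List String)) : List (String × Int) :=
  match access_answers.foldl stepA (0, 0, 0, 0, 0, 0, 0) with
  | (vc, na, sc, nvc, naac, dk, rf) =>
    -- seven assignments to distinct fresh keys of an empty dict = this association list, in insertion order
    [("Very concerned", vc), ("Not applicable/don't believe in birth control", na),
     ("Somewhat concerned", sc), ("Not very concerned", nvc), ("Not at all concerned", naac),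
     ("Don't know", dk), ("Refused", rf)]

-- ===== PORT B =====
def pvLabels : List String :=
  ["Very concerned", "Not applicable/don't believe in birth control", "Somewhat concerned",
   "Not very concerned", "Not at all concerned", "Don't know"]

def count_birth_control_access_answers_alt (access_answers : List (List String)) : List (String × Int) :=
  -- dict comprehension over the six distinct labels = this association list, in order
  let totaled := pvLabels.map (fun lab => (lab, (PySem.List.count access_answers [lab] : Int)))
  totaled ++ [("Refused", (access_answers.length : Int) - (totaled.map (·.2)).sum)]

-- ===== PRECONDITION & SPEC =====
def Spec_count_birth_control_access_answers (access_answers : List (List String)) (out : List (String × Int)) : Prop := out = count_birth_control_access_answers_alt access_answers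
instance (access_answers : List (List String)) (out : List (String × Int)) : Decidable (Spec_count_birth_control_access_answers access_answers out) := by unfold Spec_count_birth_control_access_answers; infer_instance

-- ===== CLAIM (what is proved, stated in full; the proofs are below) =====
def Claim_equal_count_birth_control_access_answers : Prop := ∀ (access_answers : List (List String)), Dom_count_birth_control_access_answers access_answers → Spec_count_birth_control_access_answers access_answers (count_birth_control_access_answers access_answers)

-- ===== LEMMAS AND PROOFS =====

-- invariant of A's loop: each counter accumulates the count of its answer,
-- the last one the number of rows matching none of the six.
theorem foldA_eq (xs : List (List String)) (st : Int × Int × Int × Int × Int × Int × Int) :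
    xs.foldl stepA st =
      (st.1 + (List.count ["Very concerned"] xs : Int),
       st.2.1 + (List.count ["Not applicable/don't believe in birth control"] xs : Int),
       st.2.2.1 + (List.count ["Somewhat concerned"] xs : Int),
       st.2.2.2.1 + (List.count ["Not very concerned"] xs : Int),
       st.2.2.2.2.1 + (List.count ["Not at all concerned"] xs : Int),
       st.2.2.2.2.2.1 + (List.count ["Don't know"] xs : Int),
       st.2.2.2.2.2.2 + (xs.length : Int)
         - ((List.count ["Very concerned"] xs : Int)
            + (List.count ["Not applicable/don't believe in birth control"] xs : Int)
            + (List.count ["Somewhat concerned"] xs : Int)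
            + (List.count ["Not very concerned"] xs : Int)
            + (List.count ["Not at all concerned"] xs : Int)
            + (List.count ["Don't know"] xs : Int))) := by
  induction xs generalizing st with
  | nil => simp
  | cons x xs ih =>
    obtain ⟨a, b, c, d, e, f, g⟩ := st
    rw [List.foldl_cons, ih]
    by_cases h1 : x = ["Very concerned"]
    · subst h1
      simp [stepA, Prod.mk.injEq]
      omega
    · by_cases h2 : x = ["Not applicable/don't believe in birth control"]
      · subst h2
        simp [stepA, Prod.mk.injEq]
        omega
      · by_cases h3 : x = ["Somewhat concerned"]
        · subst h3
          simp [stepA, Prod.mk.injEq]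
          omega
        · by_cases h4 : x = ["Not very concerned"]
          · subst h4
            simp [stepA, Prod.mk.injEq]
            omega
          · by_cases h5 : x = ["Not at all concerned"]
            · subst h5
              simp [stepA, Prod.mk.injEq]
              omega
            · by_cases h6 : x = ["Don't know"]
              · subst h6
                simp [stepA, Prod.mk.injEq]
                omega
              · simp [stepA, h1, h2, h3, h4, h5, h6, Prod.mk.injEq]
                omega

theorem count_birth_control_access_answers_spec : Claim_equal_count_birth_control_access_answers := by
  intro xs _
  unfold Spec_count_birth_control_access_answers
  unfold count_birth_control_access_answers count_birth_control_access_answers_alt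
  rw [foldA_eq]
  simp only [pvLabels, List.map, PySem.List.count_eq, List.cons_append, List.nil_append,
    List.map_cons, List.sum_cons, List.sum_nil, Prod.mk.injEq, List.cons.injEq,
    and_true, true_and]
  omega

-- ===== VERDICT (by name: the statement is the Claim_ definition above) =====
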